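-- pv_equiv track=rewrite | github.com/hunazala/Agent | app.py | _get_question_category
-- ===== SOURCE A (Python) =====
-- def _get_question_category(question_index: int) -> str:
--     """Determine the category of a question based on its index and focus area"""
--     focus_areas = {
--         (0, 2): "Vision & Purpose",
--         (3, 8): "Market Opportunity",
--         (9, 11): "Competitive Advantage",
--         (12, 15): "Value Proposition",
--         (16, 16): "Sustainability",
--         (17, 19): "Execution Feasibility"
--     }
--
--     for (start, end), category in focus_areas.items():
--         if start <= question_index <= end:
--             return category
--
--     return "General Business"
-- ===== SOURCE B (Python) =====
-- _CATEGORIES = {}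
-- for _i in range(0, 3):
--     _CATEGORIES[_i] = "Vision & Purpose"
-- for _i in range(3, 9):
--     _CATEGORIES[_i] = "Market Opportunity"
-- for _i in range(9, 12):
--     _CATEGORIES[_i] = "Competitive Advantage"
-- for _i in range(12, 16):
--     _CATEGORIES[_i] = "Value Proposition"
-- _CATEGORIES[16] = "Sustainability"
-- for _i in range(17, 20):
--     _CATEGORIES[_i] = "Execution Feasibility"
--
--
-- def _get_question_category(question_index: int) -> str:
--     return _CATEGORIES.get(question_index, "General Business")
-- ===== Notes on version B (the rewrite author's own statement) =====
-- stated objective: simpler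
-- what changed: Replaced the per-call loop over (start, end) range pairs with a precomputed flat index-to-category dict built once at module load; the function body is a single dict .get with a default.
import Mathlib
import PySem

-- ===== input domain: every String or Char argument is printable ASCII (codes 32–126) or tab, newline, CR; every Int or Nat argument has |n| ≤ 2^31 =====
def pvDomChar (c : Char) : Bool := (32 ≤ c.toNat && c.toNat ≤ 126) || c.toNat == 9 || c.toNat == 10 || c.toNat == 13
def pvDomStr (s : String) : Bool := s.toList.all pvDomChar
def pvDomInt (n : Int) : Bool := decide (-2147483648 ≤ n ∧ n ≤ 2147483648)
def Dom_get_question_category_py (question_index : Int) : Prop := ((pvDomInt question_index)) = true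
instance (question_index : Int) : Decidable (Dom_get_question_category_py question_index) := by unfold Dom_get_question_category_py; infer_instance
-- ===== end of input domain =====

-- B replaces the per-call scan over range pairs with a precomputed flat index→category dict (simpler constant-time lookup).


-- ===== PORT A =====
-- A iterates over the dict's items in insertion order, returning on the first range containing the index.
def pyFocusAreas : List ((Int × Int) × String) :=
  [((0, 2), "Vision & Purpose"),
   ((3, 8), "Market Opportunity"),
   ((9, 11), "Competitive Advantage"),
   ((12, 15), "Value Proposition"),
   ((16, 16), "Sustainability"),
   ((17, 19), "Execution Feasibility")]

def pyScanAreas (question_index : Int) : List ((Int × Int) × String) → String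
  | [] => "General Business"
  | ((s, e), cat) :: rest =>
      if s ≤ question_index ∧ question_index ≤ e then cat
      else pyScanAreas question_index rest

def get_question_category_py (question_index : Int) : String :=
  pyScanAreas question_index pyFocusAreas

-- ===== PORT B =====
-- B builds a flat index→category dict once (mirroring Source B's module-level loops), then a single getD.
def pyCategories : PySem.Dict Int String :=
  let d : PySem.Dict Int String := PySem.Dict.empty
  let d := (PySem.List.pyRange 0 3 1).foldl (fun d i => d.insert i "Vision & Purpose") d
  let d := (PySem.List.pyRange 3 9 1).foldl (fun d i => d.insert i "Market Opportunity") d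
  let d := (PySem.List.pyRange 9 12 1).foldl (fun d i => d.insert i "Competitive Advantage") d
  let d := (PySem.List.pyRange 12 16 1).foldl (fun d i => d.insert i "Value Proposition") d
  let d := d.insert 16 "Sustainability"
  (PySem.List.pyRange 17 20 1).foldl (fun d i => d.insert i "Execution Feasibility") d

def get_question_category_py_alt (question_index : Int) : String :=
  pyCategories.getD question_index "General Business"

-- ===== PRECONDITION & SPEC =====
def Spec_get_question_category_py (question_index : Int) (out : String) : Prop := out = get_question_category_py_alt question_index
instance (question_index : Int) (out : String) : Decidable (Spec_get_question_category_py question_index out) := by unfold Spec_get_question_category_py; infer_instance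

-- ===== CLAIM (what is proved, stated in full; the proofs are below) =====
def Claim_equal_get_question_category_py : Prop := ∀ (question_index : Int), Dom_get_question_category_py question_index → Spec_get_question_category_py question_index (get_question_category_py question_index)

-- ===== LEMMAS AND PROOFS =====
-- Out of range [0,19] both programs return "General Business".
set_option maxHeartbeats 1000000 in
theorem pv_out_of_range (n : Int) (h : n < 0 ∨ 19 < n) :
    get_question_category_py n = get_question_category_py_alt n := by
  have hA : get_question_category_py n = "General Business" := by
    simp only [get_question_category_py, pyFocusAreas, pyScanAreas]
    split_ifs <;> first | rfl | omega
  have hB : get_question_category_py_alt n = "General Business" := by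
    have hd : pyCategories = PySem.Dict.mk
      [((0 : Int), "Vision & Purpose"),
       ((1 : Int), "Vision & Purpose"),
       ((2 : Int), "Vision & Purpose"),
       ((3 : Int), "Market Opportunity"),
       ((4 : Int), "Market Opportunity"),
       ((5 : Int), "Market Opportunity"),
       ((6 : Int), "Market Opportunity"),
       ((7 : Int), "Market Opportunity"),
       ((8 : Int), "Market Opportunity"),
       ((9 : Int), "Competitive Advantage"),
       ((10 : Int), "Competitive Advantage"),
       ((11 : Int), "Competitive Advantage"),
       ((12 : Int), "Value Proposition"),
       ((13 : Int), "Value Proposition"),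
       ((14 : Int), "Value Proposition"),
       ((15 : Int), "Value Proposition"),
       ((16 : Int), "Sustainability"),
       ((17 : Int), "Execution Feasibility"),
       ((18 : Int), "Execution Feasibility"),
       ((19 : Int), "Execution Feasibility")] := by rfl
    simp only [get_question_category_py_alt, hd, PySem.Dict.getD_eq_get?_getD,
      PySem.Dict.get?_mk_cons, beq_iff_eq]
    repeat rw [if_neg (by omega)]
    rfl
  rw [hA, hB]

-- ===== VERDICT (by name: the statement is the Claim_ definition above) =====
theorem get_question_category_py_spec : Claim_equal_get_question_category_py := by
  intro n _
  unfold Spec_get_question_category_py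
  by_cases h : 0 ≤ n ∧ n ≤ 19
  · obtain ⟨h1, h2⟩ := h
    interval_cases n <;> decide
  · exact pv_out_of_range n (by omega)
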